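-- pv_equiv track=rewrite | github.com/ps-nithin/pyrebel_old | travels.py | carry_forward
-- ===== SOURCE A (Python) =====
-- def carry_forward(lst):
--     cf_array=list()
--     cf=lst[-1]+lst[0]
--     cf_array.append(cf)
--     for i in range(1,len(lst)):
--         cf=cf+lst[i]
--         cf_array.append(cf)
--     return cf_array
-- ===== SOURCE B (Python) =====
-- def carry_forward(lst):
--     offset = lst[-1]
--     prefix = []
--     total = 0
--     for x in lst:
--         total += x
--         prefix.append(total)
--     return [offset + s for s in prefix]
-- ===== Notes on version B (the rewrite author's own statement) =====
-- stated objective: idiomatic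
-- what changed: B computes the plain prefix sums of the whole list in one pass and then adds the constant offset (the last element) over them in a separate mapping step, instead of A's fold that seeds its accumulator with the sum of the last and first elements and walks the rest by index.
import Mathlib
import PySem

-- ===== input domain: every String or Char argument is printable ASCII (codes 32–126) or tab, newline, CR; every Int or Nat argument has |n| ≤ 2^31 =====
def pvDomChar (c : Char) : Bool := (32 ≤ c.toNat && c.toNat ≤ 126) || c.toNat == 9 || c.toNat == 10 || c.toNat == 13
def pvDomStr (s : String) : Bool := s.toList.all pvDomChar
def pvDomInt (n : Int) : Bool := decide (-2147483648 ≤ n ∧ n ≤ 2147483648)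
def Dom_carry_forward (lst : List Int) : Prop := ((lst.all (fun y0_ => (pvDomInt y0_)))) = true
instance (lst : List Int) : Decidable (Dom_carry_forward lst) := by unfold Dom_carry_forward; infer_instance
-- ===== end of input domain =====

-- B computes plain prefix sums then maps the constant offset (the last element) over them, instead of A's
-- seeded index-loop fold; same O(n) cost, different decomposition (objective: idiomatic).


-- ===== PORT A =====
def carry_forward (lst : List Int) : List Int :=
  match PySem.List.pyGet? lst (-1), PySem.List.pyGet? lst 0 with
  | some last, some first =>
      let cf : Int := last + first
      ((PySem.List.pyRange 1 lst.length 1).foldl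
        (fun (st : Int × List Int) i =>
          let cf := st.1 + PySem.List.pyGetD lst i 0
          (cf, st.2 ++ [cf])) (cf, [cf])).2
  | _, _ => []

-- ===== PORT B =====
-- running prefix sums of the list (B's one-pass 'total/prefix' loop)
def pvPrefix : Int → List Int → List Int
  | _, [] => []
  | t, x :: xs => (t + x) :: pvPrefix (t + x) xs

def carry_forward_alt (lst : List Int) : List Int :=
  match PySem.List.pyGet? lst (-1) with
  | some offset => (pvPrefix 0 lst).map (fun s => offset + s)
  | none => []

-- ===== PRECONDITION & SPEC =====
-- Pre_ excludes only the empty list, on which the Python A raises IndexError reading the last element.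
def Pre_carry_forward (lst : List Int) : Prop := lst ≠ []
instance (lst : List Int) : Decidable (Pre_carry_forward lst) := by unfold Pre_carry_forward; infer_instance
def pvWitness_carry_forward : List Int := ([3, -1, 4])

def Spec_carry_forward (lst : List Int) (out : List Int) : Prop := out = carry_forward_alt lst
instance (lst : List Int) (out : List Int) : Decidable (Spec_carry_forward lst out) := by unfold Spec_carry_forward; infer_instance

-- ===== CLAIM (what is proved, stated in full; the proofs are below) =====
def Claim_equal_carry_forward : Prop := ∀ (lst : List Int), Dom_carry_forward lst → Pre_carry_forward lst → Spec_carry_forward lst (carry_forward lst)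

-- ===== LEMMAS AND PROOFS =====

theorem pvFoldl_eq_prefix (ys : List Int) (c : Int) (acc : List Int) :
    (ys.foldl (fun (st : Int × List Int) v => (st.1 + v, st.2 ++ [st.1 + v])) (c, acc)).2
      = acc ++ pvPrefix c ys := by
  induction ys generalizing c acc with
  | nil => simp [pvPrefix]
  | cons y ys ih => simp [List.foldl, pvPrefix, ih]

theorem pvPrefix_map_add (ys : List Int) (o c : Int) :
    (pvPrefix c ys).map (fun s => o + s) = pvPrefix (o + c) ys := by
  induction ys generalizing c with
  | nil => rfl
  | cons y ys ih => simp [pvPrefix, ih, add_assoc]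

-- ===== VERDICT (by name: the statement is the Claim_ definition above) =====
theorem carry_forward_spec : Claim_equal_carry_forward := by
  intro lst _ hpre
  unfold Spec_carry_forward carry_forward carry_forward_alt
  cases lst with
  | nil => exact absurd rfl hpre
  | cons x xs =>
    have hlast := PySem.List.pyGet?_neg_ofNat (x :: xs) 1 Nat.one_pos (by simp)
    have hine : xs.length < (x :: xs).length := by simp
    have h9 : (x :: xs)[xs.length]? = some ((x :: xs)[xs.length]'hine) :=
      List.getElem?_eq_getElem hine
    rw [hlast, PySem.List.pyGet?_zero]
    simp only [List.length_cons, Nat.add_sub_cancel, List.getElem?_cons_zero] at h9 ⊢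
    rw [h9]
    dsimp only
    set o : Int := (x :: xs)[xs.length]'hine with ho
    have hfold := PySem.List.foldl_pyRange_pyGetD' (x :: xs) 0
      (fun (st : Int × List Int) v => (st.1 + v, st.2 ++ [st.1 + v]))
      (o + x, [o + x]) (a := 1) (by omega)
    simp only [Int.toNat_one, List.drop_one, List.tail_cons] at hfold
    refine Eq.trans (congrArg Prod.snd hfold) ?_
    rw [pvFoldl_eq_prefix]
    simp [pvPrefix, pvPrefix_map_add]
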